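-- pv_equiv track=rewrite | github.com/jinyul80/coding_test | python/learn_to_solving_puzzles/puzzle2.py | choose_time
-- ===== SOURCE A (Python) =====
-- def choose_time(times):
--     rcount = 0
--     max_count = time = 0
--
--     for t in times:
--         if t[1] == "start":
--             rcount += 1
--         elif t[1] == "end":
--             rcount -= 1
--
--         if rcount > max_count:
--             max_count = rcount
--             time = t[0]
--
--     return max_count, time
-- ===== SOURCE B (Python) =====
-- def choose_time(times):
--     # Pass 1: table of running concurrent-session totals.
--     totals = []
--     c = 0
--     for _, kind in times:
--         if kind == "start":
--             c += 1
--         elif kind == "end":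
--             c -= 1
--         totals.append(c)
--     # Pass 2: global max of the table; (0, 0) if it never goes positive.
--     m = max(totals, default=0)
--     if m <= 0:
--         return 0, 0
--     # Pass 3: first index reaching the max gives the time.
--     return m, times[totals.index(m)][0]
-- ===== Notes on version B (the rewrite author's own statement) =====
-- stated objective: alternative
-- what changed: Replaces the single fused tracking loop (running count + strict-improvement max/time update) by three separate passes: build the table of running totals, take its global max, then find the first index attaining it.
import Mathlib
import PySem

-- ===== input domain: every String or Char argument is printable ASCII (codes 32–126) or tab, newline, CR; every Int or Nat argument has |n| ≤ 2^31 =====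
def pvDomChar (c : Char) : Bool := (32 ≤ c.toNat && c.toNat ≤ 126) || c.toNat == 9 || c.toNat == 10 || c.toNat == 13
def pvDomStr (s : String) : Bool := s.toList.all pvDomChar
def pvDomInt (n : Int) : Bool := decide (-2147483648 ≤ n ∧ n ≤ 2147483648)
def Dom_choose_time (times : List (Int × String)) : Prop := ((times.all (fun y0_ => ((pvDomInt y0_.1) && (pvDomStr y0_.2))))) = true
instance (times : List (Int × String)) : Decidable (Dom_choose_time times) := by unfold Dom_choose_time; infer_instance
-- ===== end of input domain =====

-- B replaces A's single fused tracking loop by three passes (running-totals table, global max, first index of the max); alternative decomposition, same O(n) cost.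

-- the 'if start: +1 elif end: -1' update both Pythons perform on the running count
def nextCount (c : Int) (t : Int × String) : Int :=
  if t.2 == "start" then c + 1 else if t.2 == "end" then c - 1 else c

-- ===== PORT A =====
def chooseStep (st : Int × Int × Int) (t : Int × String) : Int × Int × Int :=
  let rcount := nextCount st.1 t
  if rcount > st.2.1 then (rcount, rcount, t.1) else (rcount, st.2.1, st.2.2)

def choose_time (times : List (Int × String)) : Int × Int :=
  let s := times.foldl chooseStep (0, 0, 0)
  (s.2.1, s.2.2)

-- ===== PORT B =====
-- pass 1 of Source B: the list of running totals (loop with append)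
def altTotals (c : Int) : List (Int × String) → List Int
  | [] => []
  | t :: ts => nextCount c t :: altTotals (nextCount c t) ts

def choose_time_alt (times : List (Int × String)) : Int × Int :=
  let totals := altTotals 0 times
  let m := PySem.List.maxD totals (fun x => x) 0      -- max(totals, default=0)
  if m ≤ 0 then (0, 0)
  else
    match PySem.List.index? totals m with             -- totals.index(m); m > 0 is always in totals,
    | some i => (m, ((PySem.List.pyGet? times (i : Int)).getD (0, "")).1)  -- and i < len(times), so the
    | none => (0, 0)                                  -- defaults here are never reached

-- ===== PRECONDITION & SPEC =====
def Spec_choose_time (times : List (Int × String)) (out : Int × Int) : Prop := out = choose_time_alt times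
instance (times : List (Int × String)) (out : Int × Int) : Decidable (Spec_choose_time times out) := by unfold Spec_choose_time; infer_instance

-- ===== CLAIM (what is proved, stated in full; the proofs are below) =====
def Claim_equal_choose_time : Prop := ∀ (times : List (Int × String)), Dom_choose_time times → Spec_choose_time times (choose_time times)

-- ===== LEMMAS AND PROOFS =====

-- proof-only abbreviations: the last running total and the table maximum of a prefix
def lastTot (l : List (Int × String)) : Int := (altTotals 0 l).getLastD 0
def mOf (l : List (Int × String)) : Int := PySem.List.maxD (altTotals 0 l) (fun x => x) 0

lemma length_altTotals (c : Int) (l : List (Int × String)) :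
    (altTotals c l).length = l.length := by
  induction l generalizing c with
  | nil => rfl
  | cons t ts ih => simp [altTotals, ih]

lemma getLastD_cons' {α : Type} (a : α) (l : List α) (d : α) :
    (a :: l).getLastD d = l.getLastD a := by
  cases l <;> rfl

lemma altTotals_concat (c : Int) (l : List (Int × String)) (t : Int × String) :
    altTotals c (l ++ [t]) = altTotals c l ++ [nextCount ((altTotals c l).getLastD c) t] := by
  induction l generalizing c with
  | nil => simp [altTotals]
  | cons u us ih => rw [List.cons_append, altTotals, altTotals, ih, getLastD_cons', List.cons_append]

lemma maxD_id_nil (d : Int) : PySem.List.maxD ([] : List Int) (fun x => x) d = d := rfl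

lemma maxD_id_cons (x : Int) (t : List Int) (d : Int) :
    PySem.List.maxD (x :: t) (fun x => x) d = t.foldl max x := by
  simp [PySem.List.maxD, PySem.List.max?_id_cons]

lemma le_maxD (xs : List Int) : ∀ y ∈ xs, y ≤ PySem.List.maxD xs (fun x => x) 0 := by
  intro y hy
  cases xs with
  | nil => cases hy
  | cons x t =>
      rw [maxD_id_cons]
      rcases List.mem_cons.mp hy with h | h
      · exact h ▸ (PySem.List.le_foldl_max t x).1
      · exact (PySem.List.le_foldl_max t x).2 y h

lemma maxD_mem (xs : List Int) (h : xs ≠ []) :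
    PySem.List.maxD xs (fun x => x) 0 ∈ xs := by
  cases xs with
  | nil => exact absurd rfl h
  | cons x t =>
      rw [maxD_id_cons]
      rcases PySem.List.foldl_max_mem t x with h | h
      · rw [h]; exact List.mem_cons_self ..
      · exact List.mem_cons_of_mem _ h

lemma maxD_concat (xs : List Int) (r : Int) :
    PySem.List.maxD (xs ++ [r]) (fun x => x) 0 =
      if xs = [] then r else max (PySem.List.maxD xs (fun x => x) 0) r := by
  cases xs with
  | nil => simp [maxD_id_cons]
  | cons x t => simp [maxD_id_cons, List.foldl_append]

lemma alt_unfold (l : List (Int × String)) :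
    choose_time_alt l =
      if mOf l ≤ 0 then (0, 0)
      else
        match PySem.List.index? (altTotals 0 l) (mOf l) with
        | some i => (mOf l, ((PySem.List.pyGet? l (i : Int)).getD (0, "")).1)
        | none => (0, 0) := rfl

lemma alt_fst (l : List (Int × String)) : (choose_time_alt l).1 = max 0 (mOf l) := by
  rw [alt_unfold]
  split
  · next h => omega
  · next h =>
      have hmpos : 0 < mOf l := by omega
      have hne : altTotals 0 l ≠ [] := by
        intro he; unfold mOf at hmpos; rw [he, maxD_id_nil] at hmpos; omega
      have hmem : mOf l ∈ altTotals 0 l := maxD_mem _ hne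
      cases hidx : PySem.List.index? (altTotals 0 l) (mOf l) with
      | none => exact absurd hmem ((PySem.List.index?_eq_none_iff _ _).mp hidx)
      | some i => simp; omega

lemma lastTot_concat (l : List (Int × String)) (t : Int × String) :
    lastTot (l ++ [t]) = nextCount (lastTot l) t := by
  unfold lastTot; rw [altTotals_concat, List.getLastD_concat]

lemma mOf_concat (l : List (Int × String)) (t : Int × String) :
    mOf (l ++ [t]) =
      if altTotals 0 l = [] then nextCount (lastTot l) t
      else max (mOf l) (nextCount (lastTot l) t) := by
  unfold mOf lastTot; rw [altTotals_concat, maxD_concat]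

-- how B's three-pass answer evolves when one more event is appended
lemma alt_concat (l : List (Int × String)) (t : Int × String) :
    choose_time_alt (l ++ [t]) =
      if (choose_time_alt l).1 < nextCount (lastTot l) t
      then (nextCount (lastTot l) t, t.1)
      else choose_time_alt l := by
  obtain ⟨r, hr⟩ : ∃ r, nextCount (lastTot l) t = r := ⟨_, rfl⟩
  have hfst := alt_fst l
  have hT' : altTotals 0 (l ++ [t]) = altTotals 0 l ++ [r] := by
    rw [altTotals_concat]; unfold lastTot at hr; rw [hr]
  by_cases hgt : (choose_time_alt l).1 < r
  · have hr0 : 0 < r := by omega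
    have hrm : mOf l < r := by omega
    have hnot : r ∉ altTotals 0 l := fun hmem => absurd (le_maxD _ r hmem) (by rw [← mOf]; omega)
    have hm' : mOf (l ++ [t]) = r := by
      rw [mOf_concat, hr]
      split
      · rfl
      · omega
    rw [alt_unfold (l ++ [t]), hm', if_neg (by omega), hT',
      PySem.List.index?_append_singleton_self _ r hnot, hr, if_pos hgt]
    have hget : PySem.List.pyGet? (l ++ [t]) (((altTotals 0 l).length : Nat) : Int) = some t := by
      rw [(show ((altTotals 0 l).length : Int) = (l.length : Int) by rw [length_altTotals]),
        PySem.List.pyGet?_natCast, List.getElem?_concat_length]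
    simp [hget]
  · have hle : r ≤ max 0 (mOf l) := by omega
    rw [hr, if_neg hgt]
    by_cases hm0 : mOf l ≤ 0
    · have hm0' : mOf (l ++ [t]) ≤ 0 := by
        rw [mOf_concat, hr]
        split
        · omega
        · omega
      rw [alt_unfold (l ++ [t]), if_pos hm0', alt_unfold l, if_pos hm0]
    · have hmpos : 0 < mOf l := by omega
      have hne : altTotals 0 l ≠ [] := by
        intro he; unfold mOf at hmpos; rw [he, maxD_id_nil] at hmpos; omega
      have hmem : mOf l ∈ altTotals 0 l := maxD_mem _ hne
      have hm' : mOf (l ++ [t]) = mOf l := by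
        rw [mOf_concat, hr]
        split
        · next he => exact absurd he hne
        · omega
      rw [alt_unfold (l ++ [t]), hm', if_neg (by omega), hT',
        PySem.List.index?_append_of_mem [r] hmem, alt_unfold l, if_neg (by omega)]
      cases hi : PySem.List.index? (altTotals 0 l) (mOf l) with
      | none => rfl
      | some i =>
          obtain ⟨hk, -, -⟩ := PySem.List.getElem_of_index?_eq_some hi
          rw [length_altTotals] at hk
          have hpg : PySem.List.pyGet? (l ++ [t]) (i : Int) = PySem.List.pyGet? l (i : Int) := by
            rw [PySem.List.pyGet?_natCast, PySem.List.pyGet?_natCast,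
              List.getElem?_append_left hk]
          simp [hpg]

-- main invariant: A's loop state after any prefix equals (last running total, B's answer)
lemma main_inv (l : List (Int × String)) :
    l.foldl chooseStep (0, 0, 0) = (lastTot l, (choose_time_alt l).1, (choose_time_alt l).2) := by
  induction l using List.reverseRecOn with
  | nil => rfl
  | append_singleton l t ih =>
      rw [List.foldl_concat, ih, alt_concat, lastTot_concat]
      simp only [chooseStep]
      by_cases hgt : (choose_time_alt l).1 < nextCount (lastTot l) t
      · rw [if_pos hgt, if_pos hgt]
      · rw [if_neg hgt, if_neg hgt]

-- ===== VERDICT (by name: the statement is the Claim_ definition above) =====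
theorem choose_time_spec : Claim_equal_choose_time := by
  intro times _
  show choose_time times = choose_time_alt times
  rw [choose_time, main_inv]
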